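-- pv_equiv track=rewrite | github.com/ClintonEmok/fatsecretproxy | scripts/build_openfoodfacts_sqlite.py | code_path
-- ===== SOURCE A (Python) =====
-- def code_path(code: str) -> str:
--     # OFF splits into groups of 3 from the left, last segment gets remaining digits
--     # e.g. "0888849005406" -> "088/884/900/5406" (4+3+3+3 = 13)
--     remainder = len(code) % 3
--     if remainder > 0:
--         split = len(code) - (3 + remainder)
--         groups = [code[i : i + 3] for i in range(0, split, 3)]
--         groups.append(code[split:])
--     else:
--         groups = [code[i : i + 3] for i in range(0, len(code), 3)]
--     return "/".join(groups)
-- ===== SOURCE B (Python) =====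
-- def code_path(code: str) -> str:
--     # Peel groups of three from the front while at least six characters remain,
--     # so the final part automatically keeps the 3..5 remaining characters.
--     parts = []
--     rest = code
--     while len(rest) >= 6:
--         parts.append(rest[:3])
--         rest = rest[3:]
--     parts.append(rest)
--     return "/".join(parts)
-- ===== Notes on version B (the rewrite author's own statement) =====
-- stated objective: simpler
-- what changed: B replaces A's remainder/split-index arithmetic plus a range-comprehension of slices (and a separately appended tail slice) with a single while-loop that peels three characters off the front while at least six remain, so the long last group falls out automatically.
import Mathlib
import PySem

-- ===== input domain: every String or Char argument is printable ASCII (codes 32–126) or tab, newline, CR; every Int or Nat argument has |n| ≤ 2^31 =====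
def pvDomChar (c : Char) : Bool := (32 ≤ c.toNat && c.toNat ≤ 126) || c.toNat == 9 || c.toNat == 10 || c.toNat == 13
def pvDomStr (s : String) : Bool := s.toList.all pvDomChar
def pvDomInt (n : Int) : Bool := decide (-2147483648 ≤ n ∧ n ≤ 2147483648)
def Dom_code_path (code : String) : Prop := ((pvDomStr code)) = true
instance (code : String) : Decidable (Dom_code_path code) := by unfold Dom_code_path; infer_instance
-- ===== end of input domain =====

-- B replaces A's remainder/split-index arithmetic and range comprehension with a
-- while-loop peeling three characters while at least six remain (objective: simpler).

-- ===== PORT A =====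
-- A's group list, on the string's character list (strings are ported through List Char):
-- remainder = len % 3; if remainder > 0 build slices over range(0, len-(3+remainder), 3)
-- and append the tail slice, else slices over range(0, len, 3).
def pvAGroups (cs : List Char) : List (List Char) :=
  let remainder := PySem.Int.mod (PySem.Chars.len cs) 3
  if remainder > 0 then
    let split := PySem.Chars.len cs - (3 + remainder)
    ((PySem.List.pyRange 0 split 3).map
      (fun i => PySem.List.slice cs (some i) (some (i + 3)))) ++
      [PySem.List.slice cs (some split) none]
  else
    (PySem.List.pyRange 0 (PySem.Chars.len cs) 3).map
      (fun i => PySem.List.slice cs (some i) (some (i + 3)))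

def code_path (code : String) : String :=
  String.ofList (PySem.Chars.join ['/'] (pvAGroups code.toList))

-- ===== PORT B =====
-- B's while loop: parts/rest accumulator, peel rest[:3] while len(rest) >= 6.
def pvPeel (rest : List Char) (parts : List (List Char)) : List (List Char) :=
  if _h : 6 ≤ rest.length then
    pvPeel (PySem.List.slice rest (some 3) none)
      (parts ++ [PySem.List.slice rest none (some 3)])
  else parts ++ [rest]
termination_by rest.length
decreasing_by
  rw [PySem.List.slice_from rest (by norm_num : (0:Int) ≤ 3)]
  simp only [List.length_drop]
  omega

def code_path_alt (code : String) : String :=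
  String.ofList (PySem.Chars.join ['/'] (pvPeel code.toList []))

-- ===== PRECONDITION & SPEC =====
def Spec_code_path (code : String) (out : String) : Prop := out = code_path_alt code
instance (code : String) (out : String) : Decidable (Spec_code_path code out) := by unfold Spec_code_path; infer_instance

-- ===== CLAIM (what is proved, stated in full; the proofs are below) =====
def Claim_equal_code_path : Prop := ∀ (code : String), Dom_code_path code → Spec_code_path code (code_path code)

-- ===== LEMMAS AND PROOFS =====

-- pyRange 0 (3*k) 3 is the k multiples of 3.
lemma pvPyRange3 (k : Nat) :
    PySem.List.pyRange 0 (((3 * k : Nat) : Int)) 3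
      = (List.range k).map (fun j => ((3 * j : Nat) : Int)) := by
  rw [PySem.List.pyRange_of_pos 0 _ (by norm_num)]
  have hc : (if (0:Int) < ((3 * k : Nat) : Int)
      then ((((3 * k : Nat) : Int) - 0 + 3 - 1) / 3).toNat else 0) = k := by
    split_ifs with h <;> push_cast at * <;> omega
  rw [hc]
  refine List.map_congr_left ?_
  intro j _
  push_cast
  ring

lemma pvPyRangeNonpos (b : Int) (hb : b ≤ 0) :
    PySem.List.pyRange 0 b 3 = [] := by
  rw [PySem.List.pyRange_of_pos 0 _ (by norm_num)]
  have : (if (0:Int) < b then ((b - 0 + 3 - 1) / 3).toNat else 0) = 0 := by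
    split_ifs with h
    · omega
    · rfl
  rw [this]
  rfl

lemma pvModCast (n : Nat) : PySem.Int.mod (n : Int) 3 = ((n % 3 : Nat) : Int) := by
  rw [PySem.Int.mod_eq_emod_of_pos (by norm_num)]
  push_cast
  rfl

-- the slice comprehension over multiples of 3 is the chunk list
lemma pvMapChunks (cs : List Char) (k : Nat) :
    ((List.range k).map (fun j => ((3 * j : Nat) : Int))).map
        (fun i => PySem.List.slice cs (some i) (some (i + 3)))
      = (List.range k).map (fun j => (cs.drop (3 * j)).take 3) := by
  rw [List.map_map]
  refine List.map_congr_left ?_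
  intro j _
  show PySem.List.slice cs (some ((3 * j : Nat) : Int)) (some (((3 * j : Nat) : Int) + 3)) = _
  have h3 : (((3 * j : Nat) : Int) + 3) = ((3 * j + 3 : Nat) : Int) := by push_cast; ring
  rw [h3, PySem.List.slice_natCast]
  congr 1
  omega

lemma pvChunksCons (cs : List Char) (k : Nat) :
    (List.range (k + 1)).map (fun j => (cs.drop (3 * j)).take 3)
      = cs.take 3 :: (List.range k).map (fun j => ((cs.drop 3).drop (3 * j)).take 3) := by
  rw [List.range_succ_eq_map, List.map_cons, List.map_map]
  refine congrArg₂ _ (by simp) ?_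
  refine List.map_congr_left ?_
  intro j _
  show (cs.drop (3 * (j + 1))).take 3 = ((cs.drop 3).drop (3 * j)).take 3
  rw [List.drop_drop, show 3 + 3 * j = 3 * (j + 1) from by ring]

-- A's group list peels its first chunk of three when at least six characters remain.
lemma pvAGroups_step (cs : List Char) (h : 6 ≤ cs.length) :
    pvAGroups cs = cs.take 3 :: pvAGroups (cs.drop 3) := by
  unfold pvAGroups
  dsimp only
  rw [PySem.Chars.len_eq, PySem.Chars.len_eq, pvModCast, pvModCast, List.length_drop]
  by_cases hr : cs.length % 3 = 0
  · have hr' : (cs.length - 3) % 3 = 0 := by omega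
    rw [hr, hr']
    simp only [Nat.cast_zero, lt_irrefl, if_false]
    obtain ⟨k, hk⟩ : ∃ k, cs.length = 3 * (k + 1) := ⟨cs.length / 3 - 1, by omega⟩
    have hk' : cs.length - 3 = 3 * k := by omega
    rw [hk]
    have hk2 : 3 * (k + 1) - 3 = 3 * k := by omega
    rw [hk2, pvPyRange3, pvPyRange3, pvMapChunks, pvMapChunks, pvChunksCons]
  · have hr' : (cs.length - 3) % 3 = cs.length % 3 := by omega
    rw [hr']
    have hpos : (0:Int) < ((cs.length % 3 : Nat) : Int) := by
      have : 0 < cs.length % 3 := Nat.pos_of_ne_zero hr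
      exact_mod_cast this
    rw [if_pos hpos, if_pos hpos]
    set r := cs.length % 3 with hrdef
    have hsplit : ((cs.length : Int) - (3 + ((r : Nat) : Int))) = ((cs.length - 3 - r : Nat) : Int) := by
      have : r < 3 := Nat.mod_lt _ (by norm_num)
      omega
    have hsplit' : (((cs.length - 3 : Nat) : Int) - (3 + ((r : Nat) : Int)))
        = ((cs.length - 3 - 3 - r : Nat) : Int) := by
      have hr3 : r < 3 := Nat.mod_lt _ (by norm_num)
      have hge : 7 ≤ cs.length := by omega
      have : 3 ∣ (cs.length - r) := by omega
      omega
    rw [hsplit, hsplit']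
    set s := cs.length - 3 - r with hsdef
    have hr3 : r < 3 := Nat.mod_lt _ (by norm_num)
    have hs3 : 3 ∣ s := by omega
    have hsge : 3 ≤ s := by omega
    obtain ⟨m, hm⟩ : ∃ m, s = 3 * (m + 1) := ⟨s / 3 - 1, by omega⟩
    have hm' : cs.length - 3 - 3 - r = 3 * m := by omega
    rw [hm, hm', pvPyRange3, pvPyRange3, pvMapChunks, pvMapChunks]
    rw [PySem.List.slice_from cs (by positivity), PySem.List.slice_from (cs.drop 3) (by positivity)]
    have htail : List.drop (((3 * (m + 1) : Nat) : Int)).toNat cs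
        = List.drop (((3 * m : Nat) : Int)).toNat (cs.drop 3) := by
      rw [Int.toNat_natCast, Int.toNat_natCast, List.drop_drop]
      congr 1
      omega
    rw [htail, pvChunksCons]
    simp

-- below six characters A produces a single group joining back to the whole string.
lemma pvAGroups_small (cs : List Char) (h : ¬ 6 ≤ cs.length) :
    PySem.Chars.join ['/'] (pvAGroups cs) = cs := by
  unfold pvAGroups
  dsimp only
  rw [PySem.Chars.len_eq, pvModCast]
  by_cases hr : cs.length % 3 = 0
  · rw [hr]
    simp only [Nat.cast_zero, lt_irrefl, if_false]
    interval_cases hn : cs.length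
    · rw [show ((0:Nat):Int) = ((3*0 : Nat) : Int) by norm_num, pvPyRange3]
      simp only [List.range_zero, List.map_nil, PySem.Chars.join_nil]
      exact (List.eq_nil_of_length_eq_zero hn).symm
    · omega
    · omega
    · rw [show ((3:Nat):Int) = ((3*1 : Nat) : Int) by norm_num, pvPyRange3, pvMapChunks]
      simp only [List.range_one, List.map_cons, List.map_nil, Nat.mul_zero, List.drop_zero]
      rw [PySem.Chars.join_singleton]
      exact List.take_of_length_le (by omega)
    · omega
    · omega
  · have hpos : (0:Int) < ((cs.length % 3 : Nat) : Int) := by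
      have : 0 < cs.length % 3 := Nat.pos_of_ne_zero hr
      exact_mod_cast this
    rw [if_pos hpos]
    have hsplit : (cs.length : Int) - (3 + ((cs.length % 3 : Nat) : Int)) ≤ 0 := by
      have : cs.length % 3 < 3 := Nat.mod_lt _ (by norm_num)
      have : cs.length % 3 ≤ cs.length := Nat.mod_le _ _
      push_cast
      omega
    rw [pvPyRangeNonpos _ hsplit]
    simp only [List.map_nil, List.nil_append]
    rw [PySem.Chars.join_singleton, PySem.List.slice_some_none]
    have : PySem.List.clampIdx cs.length ((cs.length : Int) - (3 + ((cs.length % 3 : Nat) : Int))) = 0 := by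
      unfold PySem.List.clampIdx
      have h3 : cs.length % 3 < 3 := Nat.mod_lt _ (by norm_num)
      split_ifs with h1 h2 <;> omega
    rw [this]
    rfl

lemma pvAGroups_ne_nil (cs : List Char) (h : cs ≠ []) : pvAGroups cs ≠ [] := by
  unfold pvAGroups
  dsimp only
  rw [PySem.Chars.len_eq, pvModCast]
  by_cases hr : cs.length % 3 = 0
  · rw [hr]
    simp only [Nat.cast_zero, lt_irrefl, if_false]
    obtain ⟨k, hk⟩ : ∃ k, cs.length = 3 * (k + 1) := by
      refine ⟨cs.length / 3 - 1, ?_⟩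
      have : cs.length ≠ 0 := fun h0 => h (List.eq_nil_of_length_eq_zero h0)
      omega
    rw [hk, pvPyRange3]
    simp
  · have hpos : (0:Int) < ((cs.length % 3 : Nat) : Int) := by
      have : 0 < cs.length % 3 := Nat.pos_of_ne_zero hr
      exact_mod_cast this
    rw [if_pos hpos]
    simp

-- B's loop with an accumulator is the accumulator followed by the loop from empty.
lemma pvPeel_acc (rest : List Char) (parts : List (List Char)) :
    pvPeel rest parts = parts ++ pvPeel rest [] := by
  rw [pvPeel.eq_def, pvPeel.eq_def (rest := rest) (parts := [])]
  split_ifs with h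
  · rw [pvPeel_acc (PySem.List.slice rest (some 3) none) (parts ++ [_]),
      pvPeel_acc (PySem.List.slice rest (some 3) none) ([] ++ [_])]
    simp
  · simp
termination_by rest.length
decreasing_by
  all_goals
    rw [PySem.List.slice_from rest (by norm_num : (0:Int) ≤ 3)]
    simp only [List.length_drop]
    omega

lemma pvPeel_step (cs : List Char) (h : 6 ≤ cs.length) :
    pvPeel cs [] = cs.take 3 :: pvPeel (cs.drop 3) [] := by
  rw [pvPeel.eq_def]
  rw [dif_pos h, pvPeel_acc]
  rw [PySem.List.slice_from cs (by norm_num : (0:Int) ≤ 3),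
    PySem.List.slice_to cs (by norm_num : (0:Int) ≤ 3)]
  rfl

lemma pvPeel_ne_nil (cs : List Char) : pvPeel cs [] ≠ [] := by
  rw [pvPeel.eq_def]
  split_ifs with h
  · rw [pvPeel_acc]
    simp
  · simp

-- main equivalence on character lists
lemma pvMain (cs : List Char) :
    PySem.Chars.join ['/'] (pvAGroups cs) = PySem.Chars.join ['/'] (pvPeel cs []) := by
  by_cases h : 6 ≤ cs.length
  · rw [pvAGroups_step cs h, pvPeel_step cs h]
    obtain ⟨p, ps, hp⟩ := List.exists_cons_of_ne_nil (pvAGroups_ne_nil (cs.drop 3)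
      (by intro h0; have := congrArg List.length h0; simp at this; omega))
    obtain ⟨q, qs, hq⟩ := List.exists_cons_of_ne_nil (pvPeel_ne_nil (cs.drop 3))
    rw [hp, hq, PySem.Chars.join_cons_cons, PySem.Chars.join_cons_cons, ← hp, ← hq]
    have := pvMain (cs.drop 3)
    rw [this]
  · rw [pvAGroups_small cs h, pvPeel.eq_def, dif_neg h, List.nil_append,
      PySem.Chars.join_singleton]
termination_by cs.length
decreasing_by simp; omega

-- ===== VERDICT (by name: the statement is the Claim_ definition above) =====
theorem code_path_spec : Claim_equal_code_path := by
  intro code _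
  unfold Spec_code_path code_path code_path_alt
  exact congrArg String.ofList (pvMain code.toList)
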